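-- pv_equiv track=rewrite | github.com/mxn1803/embedded-systems-design-ii | lab-3/ball_extractor/config.py | __build_arg_dict
-- ===== SOURCE A (Python) =====
-- def __build_arg_dict(args):
--     # extract configuration
--     flags = []
--     values = []
--     for i in range(len(args)):
--         if i % 2 == 0:
--             flags.append(args[i])
--         else:
--             values.append(args[i])
--
--     # should have one key per one value
--     if len(flags) != len(values):
--         return (
--             None,
--             '*** Error: Invalid number of arguments! ***'
--         )
--
--     arg_dict = dict.fromkeys(flags)
--     for i in range(len(flags)):
--         key = flags[i]
--         value = values[i]
--         if not arg_dict[key]: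
--             arg_dict[key] = []
--         arg_dict[key].append(value)
--     return arg_dict, None
-- ===== SOURCE B (Python) =====
-- def __build_arg_dict(args):
--     if len(args) % 2 != 0:
--         return (
--             None,
--             '*** Error: Invalid number of arguments! ***'
--         )
--     arg_dict = {}
--     for i in range(0, len(args), 2):
--         arg_dict.setdefault(args[i], []).append(args[i + 1])
--     return arg_dict, None
-- ===== Notes on version B (the rewrite author's own statement) =====
-- stated objective: simpler
-- what changed: Replaces A's three phases (split args into flags/values lists, dict.fromkeys, then a second indexed loop with a falsy-check to initialise each bucket) by a parity guard plus one pass over range(0, len(args), 2) using setdefault(...).append.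
import Mathlib
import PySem

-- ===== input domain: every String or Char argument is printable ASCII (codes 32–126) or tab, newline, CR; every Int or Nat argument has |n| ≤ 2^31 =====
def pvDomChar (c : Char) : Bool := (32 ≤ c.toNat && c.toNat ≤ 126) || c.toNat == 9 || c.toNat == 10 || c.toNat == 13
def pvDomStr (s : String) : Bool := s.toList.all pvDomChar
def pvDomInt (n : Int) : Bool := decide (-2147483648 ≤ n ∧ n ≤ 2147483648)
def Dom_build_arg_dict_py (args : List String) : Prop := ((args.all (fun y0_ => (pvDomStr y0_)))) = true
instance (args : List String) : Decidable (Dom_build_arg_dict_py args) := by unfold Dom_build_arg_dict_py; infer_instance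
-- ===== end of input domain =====

-- B replaces A's three phases (flags/values lists, dict.fromkeys, second indexed loop) by a parity
-- guard plus one setdefault-append pass over range(0, len(args), 2); objective: simpler.

-- ===== PORT A =====
-- Python's `not arg_dict[key]` (value None or a list) is the match on the Option value below;
-- `arg_dict[key]` never hits a missing key (all keys were pre-inserted by fromkeys), so getD is exact.
def build_arg_dict_py (args : List String) : (Option (List (String × List String))) × Option String :=
  let fv := (PySem.List.pyRange 0 (PySem.List.len args) 1).foldl
      (fun (p : List String × List String) i =>
        if i % 2 == 0 then (p.1 ++ [PySem.List.pyGetD args i ""], p.2)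
        else (p.1, p.2 ++ [PySem.List.pyGetD args i ""])) ([], [])
  let flags := fv.1
  let values := fv.2
  if flags.length ≠ values.length then
    (none, some "*** Error: Invalid number of arguments! ***")
  else
    let d0 : PySem.Dict String (Option (List String)) :=
      flags.foldl (fun d k => d.insert k none) PySem.Dict.empty
    let d := (PySem.List.pyRange 0 (PySem.List.len flags) 1).foldl
      (fun (d : PySem.Dict String (Option (List String))) i =>
        let key := PySem.List.pyGetD flags i ""
        let value := PySem.List.pyGetD values i ""
        let d := if (match d.getD key none with | none => true | some l => l.isEmpty) then
            d.insert key (some []) else d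
        d.modify key none (fun o => some (o.getD [] ++ [value]))) d0
    (some (d.items.map (fun p => (p.1, p.2.getD []))), none)

-- ===== PORT B =====
def build_arg_dict_py_alt (args : List String) : (Option (List (String × List String))) × Option String :=
  if PySem.List.len args % 2 ≠ 0 then
    (none, some "*** Error: Invalid number of arguments! ***")
  else
    let d := (PySem.List.pyRange 0 (PySem.List.len args) 2).foldl
      (fun (d : PySem.Dict String (List String)) i =>
        (d.setdefault (PySem.List.pyGetD args i "") []).modify (PySem.List.pyGetD args i "") []
          (fun l => l ++ [PySem.List.pyGetD args (i + 1) ""])) PySem.Dict.empty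
    (some d.items, none)

-- ===== PRECONDITION & SPEC =====
def Spec_build_arg_dict_py (args : List String) (out : (Option (List (String × List String))) × Option String) : Prop := out = build_arg_dict_py_alt args
instance (args : List String) (out : (Option (List (String × List String))) × Option String) : Decidable (Spec_build_arg_dict_py args out) := by unfold Spec_build_arg_dict_py; infer_instance

-- ===== CLAIM (what is proved, stated in full; the proofs are below) =====
def Claim_equal_build_arg_dict_py : Prop := ∀ (args : List String), Dom_build_arg_dict_py args → Spec_build_arg_dict_py args (build_arg_dict_py args)

-- ===== LEMMAS AND PROOFS =====


def pvEvens {α : Type} : List α → List α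
  | [] => []
  | [a] => [a]
  | a :: _ :: t => a :: pvEvens t

def pvOdds {α : Type} : List α → List α
  | [] => []
  | [_] => []
  | _ :: b :: t => b :: pvOdds t

theorem pvEnumFold (l : List String) (s : Int) (acc : List String × List String) (hs : s % 2 = 0) :
    (PySem.List.enumerate l s).foldl
      (fun p ix => if ix.1 % 2 == 0 then (p.1 ++ [ix.2], p.2) else (p.1, p.2 ++ [ix.2])) acc
      = (acc.1 ++ pvEvens l, acc.2 ++ pvOdds l) := by
  induction l using pvEvens.induct generalizing s acc with
  | case1 => simp [pvEvens, pvOdds, PySem.List.enumerate_nil]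
  | case2 a =>
      have h1 : (s % 2 == 0) = true := by simpa using hs
      simp only [PySem.List.enumerate_cons, PySem.List.enumerate_nil, List.foldl, h1, if_true]
      simp [pvEvens, pvOdds]
  | case3 a b t ih =>
      have h1 : (s % 2 == 0) = true := by simpa using hs
      have h2 : ((s + 1) % 2 == 0) = false := by simp; omega
      have h3 : (s + 2) % 2 = 0 := by omega
      simp only [PySem.List.enumerate_cons, List.foldl, h1, h2, if_true]
      have : s + 1 + 1 = s + 2 := by ring
      rw [this, ih (s + 2) _ h3]
      simp [pvEvens, pvOdds]

theorem pvFvA (args : List String) :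
    (PySem.List.pyRange 0 (PySem.List.len args) 1).foldl
      (fun (p : List String × List String) i =>
        if i % 2 == 0 then (p.1 ++ [PySem.List.pyGetD args i ""], p.2)
        else (p.1, p.2 ++ [PySem.List.pyGetD args i ""])) ([], [])
      = (pvEvens args, pvOdds args) := by
  have h := pvEnumFold args 0 ([], []) (by decide)
  rw [PySem.List.enumerate_eq_map_pyRange args "", List.foldl_map] at h
  simpa using h

theorem pvEvens_length {α : Type} (l : List α) : (pvEvens l).length = (l.length + 1) / 2 := by
  induction l using pvEvens.induct with
  | case1 => simp [pvEvens]
  | case2 a => simp [pvEvens]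
  | case3 a b t ih => simp [pvEvens, ih]; omega

theorem pvOdds_length {α : Type} (l : List α) : (pvOdds l).length = l.length / 2 := by
  induction l using pvOdds.induct with
  | case1 => simp [pvOdds]
  | case2 a => simp [pvOdds]
  | case3 a b t ih => simp [pvOdds, ih]; omega



theorem pvRangeZipNat (xs ys : List String) (h : xs.length = ys.length) :
    (List.range xs.length).map (fun i => (xs.getD i "", ys.getD i "")) = xs.zip ys := by
  induction xs generalizing ys with
  | nil => simp
  | cons x xs ih =>
      cases ys with
      | nil => simp at h
      | cons y ys =>
          simp only [List.length_cons, List.range_succ_eq_map, List.map_cons, List.map_map,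
            Function.comp_def, List.getD_cons_zero, List.getD_cons_succ, List.zip_cons_cons]
          rw [ih ys (by simpa using h)]

theorem pvRangeZip (xs ys : List String) (h : xs.length = ys.length) :
    (PySem.List.pyRange 0 (PySem.List.len xs) 1).map
      (fun i => (PySem.List.pyGetD xs i "", PySem.List.pyGetD ys i "")) = xs.zip ys := by
  have hl : PySem.List.len xs = (xs.length : ℤ) := by simp [PySem.List.len_eq]
  rw [hl, PySem.List.pyRange_zero_natCast, List.map_map]
  have h2 := pvRangeZipNat xs ys h
  simp only [Function.comp_def, PySem.List.pyGetD_natCast]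
  exact h2

theorem pvRange2 (n : ℕ) :
    PySem.List.pyRange 0 (n : ℤ) 2 = (List.range ((n + 1) / 2)).map (fun k : ℕ => 2 * (k : ℤ)) := by
  rw [PySem.List.pyRange_of_pos 0 (n : ℤ) (by norm_num)]
  have h1 : (((n : ℤ) - 0 + 2 - 1) / 2).toNat = (n + 1) / 2 := by omega
  by_cases h : (0 : ℤ) < (n : ℤ)
  · simp only [h, if_true, h1]
    apply List.map_congr_left; intro k _; ring
  · have : n = 0 := by omega
    subst this; simp

theorem pvPairsNat (t : List String) (h : t.length % 2 = 0) :
    (List.range (t.length / 2)).map (fun k => (t.getD (2 * k) "", t.getD (2 * k + 1) ""))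
      = (pvEvens t).zip (pvOdds t) := by
  induction t using pvEvens.induct with
  | case1 => simp [pvEvens, pvOdds]
  | case2 a => simp at h
  | case3 a b t ih =>
      have ht : t.length % 2 = 0 := by simp at h; omega
      have hr : (a :: b :: t).length / 2 = t.length / 2 + 1 := by simp; omega
      rw [hr, List.range_succ_eq_map, List.map_cons, List.map_map]
      show ((a :: b :: t).getD 0 "", (a :: b :: t).getD 1 "") :: _ = _
      rw [show pvEvens (a :: b :: t) = a :: pvEvens t from rfl,
        show pvOdds (a :: b :: t) = b :: pvOdds t from rfl, List.zip_cons_cons]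
      congr 1
      rw [← ih ht]
      apply List.map_congr_left; intro k _
      simp only [Function.comp_def]
      rw [show 2 * (k + 1) = 2 * k + 1 + 1 from by ring]
      simp

theorem pvRangeStep2 (args : List String) (h : args.length % 2 = 0) :
    (PySem.List.pyRange 0 (PySem.List.len args) 2).map
      (fun i => (PySem.List.pyGetD args i "", PySem.List.pyGetD args (i + 1) ""))
      = (pvEvens args).zip (pvOdds args) := by
  have hl : PySem.List.len args = (args.length : ℤ) := by simp [PySem.List.len_eq]
  rw [hl, pvRange2, show (args.length + 1) / 2 = args.length / 2 from by omega, List.map_map]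
  rw [← pvPairsNat args h]
  apply List.map_congr_left; intro k _
  simp only [Function.comp_def]
  have e1 : PySem.List.pyGetD args (2 * (k : ℤ)) "" = args.getD (2 * k) "" := by
    rw [show 2 * (k : ℤ) = ((2 * k : ℕ) : ℤ) from by push_cast; ring]
    exact PySem.List.pyGetD_natCast args (2 * k) ""
  have e2 : PySem.List.pyGetD args (2 * (k : ℤ) + 1) "" = args.getD (2 * k + 1) "" := by
    rw [show 2 * (k : ℤ) + 1 = ((2 * k + 1 : ℕ) : ℤ) from by push_cast; ring]
    exact PySem.List.pyGetD_natCast args (2 * k + 1) ""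
  rw [e1, e2]


theorem pvStepB (d : PySem.Dict String (List String)) (k v : String) :
    (d.setdefault k []).modify k [] (fun l => l ++ [v]) = d.modify k [] (fun l => l ++ [v]) := by
  show (d.setdefault k []).insert k ((d.setdefault k []).getD k [] ++ [v])
      = d.insert k (d.getD k [] ++ [v])
  rw [PySem.Dict.getD_setdefault_self]
  by_cases h : d.contains k
  · rw [PySem.Dict.setdefault_of_contains d [] h]
  · rw [PySem.Dict.setdefault_of_not_contains d [] (by simpa using h), PySem.Dict.insert_insert_self]

theorem pvStepA (d : PySem.Dict String (Option (List String))) (k v : String) :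
    (if (match d.getD k none with | none => true | some l => l.isEmpty) then
        d.insert k (some []) else d).modify k none (fun o => some (o.getD [] ++ [v]))
      = d.insert k (some ((d.getD k none).getD [] ++ [v])) := by
  cases h : d.getD k none with
  | none =>
      simp only [if_true]
      show (d.insert k (some [])).insert k
          (some (((d.insert k (some [])).getD k none).getD [] ++ [v])) = _
      rw [PySem.Dict.getD_insert_self, PySem.Dict.insert_insert_self]
      simp
  | some l =>
      by_cases hl : l = []
      · subst hl
        simp only [List.isEmpty_nil, if_true]
        show (d.insert k (some [])).insert k
            (some (((d.insert k (some [])).getD k none).getD [] ++ [v])) = _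
        rw [PySem.Dict.getD_insert_self, PySem.Dict.insert_insert_self]
      · have : l.isEmpty = false := by simpa using hl
        simp only [this]
        rw [if_neg (by simp)]
        show d.insert k (some ((d.getD k none).getD [] ++ [v])) = _
        rw [h]

theorem pvFromkeysNone (l : List String) (d : PySem.Dict String (Option (List String))) (k : String)
    (h : d.getD k none = none) :
    ((l.foldl (fun d k' => d.insert k' none) d).getD k none) = none := by
  induction l generalizing d with
  | nil => simpa using h
  | cons x t ih =>
      simp only [List.foldl_cons]
      apply ih
      rw [PySem.Dict.getD_insert]
      split <;> simp [h]

theorem pvGetDFoldA (l : List (String × String)) (d : PySem.Dict String (Option (List String))) (c : String) :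
    (((l.foldl (fun d p => d.insert p.1 (some ((d.getD p.1 none).getD [] ++ [p.2]))) d).getD c none).getD [])
      = (d.getD c none).getD [] ++ (l.filter (fun p => p.1 == c)).map (·.2) := by
  induction l generalizing d with
  | nil => simp
  | cons p t ih =>
      simp only [List.foldl_cons, List.filter_cons]
      rw [ih]
      by_cases hc : p.1 = c
      · subst hc
        rw [PySem.Dict.getD_insert_self]
        simp
      · rw [PySem.Dict.getD_insert_of_ne d _ _ (fun h => hc h.symm)]
        have : (p.1 == c) = false := by simpa using hc
        simp [this]

theorem pvUpdateSelf (l : List String) :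
    PySem.Set.update (PySem.Set.ofList l) l = PySem.Set.ofList l := by
  rw [PySem.Set.update_eq_append_filter]
  have : (PySem.Set.ofList l).filter (fun y => !(PySem.Set.contains (PySem.Set.ofList l) y)) = [] := by
    apply List.filter_eq_nil_iff.mpr
    intro y hy
    simp only [Bool.not_eq_eq_eq_not, Bool.not_true, PySem.Set.contains_eq_listContains]
    simp [(PySem.Set.mem_ofList l y).mp hy]
  rw [this]; simp

-- ===== VERDICT (by name: the statement is the Claim_ definition above) =====
theorem build_arg_dict_py_spec : Claim_equal_build_arg_dict_py := by
  intro args _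
  show build_arg_dict_py args = build_arg_dict_py_alt args
  unfold build_arg_dict_py build_arg_dict_py_alt
  simp only [pvFvA]
  by_cases hpar : args.length % 2 = 0
  · -- even number of arguments: both build the grouped dict
    have hflen : (pvEvens args).length = (pvOdds args).length := by
      rw [pvEvens_length, pvOdds_length]; omega
    have hlen2 : ¬ PySem.List.len args % 2 ≠ 0 := by
      simp [PySem.List.len_eq]; omega
    rw [if_neg (by simpa using hflen), if_neg hlen2]
    set flags := pvEvens args with hf
    set values := pvOdds args with hv
    set d0 : PySem.Dict String (Option (List String)) :=
      flags.foldl (fun d k => d.insert k none) PySem.Dict.empty with hd0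
    -- A's second loop, as a fold over the (flag, value) pairs
    have h1 : (PySem.List.pyRange 0 (PySem.List.len flags) 1).foldl
        (fun (d : PySem.Dict String (Option (List String))) i =>
          let key := PySem.List.pyGetD flags i ""
          let value := PySem.List.pyGetD values i ""
          let d := if (match d.getD key none with | none => true | some l => l.isEmpty) then
              d.insert key (some []) else d
          d.modify key none (fun o => some (o.getD [] ++ [value]))) d0
        = (flags.zip values).foldl (fun d p =>
            (if (match d.getD p.1 none with | none => true | some l => l.isEmpty) then
              d.insert p.1 (some []) else d).modify p.1 none
              (fun o => some (o.getD [] ++ [p.2]))) d0 := by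
      rw [← pvRangeZip flags values hflen, List.foldl_map]
    have h2 : (flags.zip values).foldl (fun d p =>
          (if (match d.getD p.1 none with | none => true | some l => l.isEmpty) then
            d.insert p.1 (some []) else d).modify p.1 none
            (fun o => some (o.getD [] ++ [p.2]))) d0
        = (flags.zip values).foldl (fun d p => d.insert p.1 (some ((d.getD p.1 none).getD [] ++ [p.2]))) d0 :=
      by
      apply PySem.List.foldl_congr_mem
      intro acc p _
      exact pvStepA acc p.1 p.2
    -- B's loop, as a fold over the same pairs
    have h3 : (PySem.List.pyRange 0 (PySem.List.len args) 2).foldl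
        (fun (d : PySem.Dict String (List String)) i =>
          (d.setdefault (PySem.List.pyGetD args i "") []).modify (PySem.List.pyGetD args i "") []
            (fun l => l ++ [PySem.List.pyGetD args (i + 1) ""])) PySem.Dict.empty
        = (flags.zip values).foldl (fun d p => (d.setdefault p.1 []).modify p.1 [] (fun l => l ++ [p.2]))
            PySem.Dict.empty := by
      rw [← pvRangeStep2 args hpar, List.foldl_map]
    have h4 : (flags.zip values).foldl (fun d p => (d.setdefault p.1 []).modify p.1 [] (fun l => l ++ [p.2]))
          PySem.Dict.empty
        = (flags.zip values).foldl (fun d p => d.modify p.1 [] (fun l => l ++ [p.2])) PySem.Dict.empty :=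
      by
      apply PySem.List.foldl_congr_mem
      intro acc p _
      exact pvStepB acc p.1 p.2
    rw [h1, h2, h3, h4]
    set dA := (flags.zip values).foldl (fun d p => d.insert p.1 (some ((d.getD p.1 none).getD [] ++ [p.2]))) d0 with hdA
    set dB := (flags.zip values).foldl (fun d p => d.modify p.1 [] (fun l => l ++ [p.2])) PySem.Dict.empty with hdB
    have hmapfst : (flags.zip values).map Prod.fst = flags := List.map_fst_zip (le_of_eq hflen)
    have hk0 : d0.keys = PySem.Set.ofList flags := by
      rw [hd0, PySem.Dict.keys_foldl_insert flags _ PySem.Dict.empty, PySem.Dict.keys_empty,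
        PySem.Set.update_nil_left]
    have hkA : dA.keys = PySem.Set.ofList flags := by
      rw [hdA, PySem.Dict.keys_foldl_insert_key (flags.zip values) Prod.fst _ d0, hmapfst, hk0, pvUpdateSelf]
    have hkB : dB.keys = PySem.Set.ofList flags := by
      rw [hdB, PySem.Dict.keys_foldl_modify_key (flags.zip values) Prod.fst [] _ PySem.Dict.empty, hmapfst,
        PySem.Dict.keys_empty, PySem.Set.update_nil_left]
    have hnA : dA.keys.Nodup := by
      rw [hkA]; exact PySem.Set.nodup_ofList flags
    have hnB : dB.keys.Nodup := by
      rw [hkB]; exact PySem.Set.nodup_ofList flags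
    rw [PySem.Dict.items_eq_map_keys dA hnA none, PySem.Dict.items_eq_map_keys dB hnB [],
      hkA, hkB, List.map_map]
    have hval : ∀ k, ((dA.getD k none).getD [] : List String)
        = dB.getD k [] := by
      intro k
      rw [hdA, pvGetDFoldA, hdB, PySem.Dict.getD_foldl_modify_append]
      have : d0.getD k none = none := by
        rw [hd0]
        exact pvFromkeysNone flags PySem.Dict.empty k (PySem.Dict.getD_empty k none)
      rw [this, PySem.Dict.getD_empty]
      simp
    refine congrArg (fun x => (some x, none)) ?_
    apply List.map_congr_left
    intro k _
    simp only [Function.comp_def]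
    rw [hval k]
  · -- odd number of arguments: both return the error tuple
    have hflen : (pvEvens args).length ≠ (pvOdds args).length := by
      rw [pvEvens_length, pvOdds_length]; omega
    have hlen2 : PySem.List.len args % 2 ≠ 0 := by
      simp [PySem.List.len_eq]; omega
    rw [if_pos (by simpa using hflen), if_pos hlen2]
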